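-- pv_equiv track=rewrite | github.com/JulesBoissier/Advent-of-Code-2025 | 03-12-2025/first_problem.py | find_highest_joltage
-- ===== SOURCE A (Python) =====
-- def find_highest_joltage(banks):
--     total_joltage = 0
--     for bank in banks:
--         highest_ten = 0
--         highest_unit = 0
--         highest_ten_idx = 0
--         for idx, digit in enumerate(bank[:-1]):
--             if int(digit) > highest_ten:
--                 highest_ten = int(digit)
--                 highest_ten_idx = idx
--         for digit in bank[highest_ten_idx+1:]:
--             if int(digit) > highest_unit:
--                 highest_unit = int(digit)
--
--         total_joltage += 10 * highest_ten + highest_unit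
--
--     return total_joltage
-- ===== SOURCE B (Python) =====
-- def find_highest_joltage(banks):
--     total = 0
--     for bank in banks:
--         if len(bank) < 2:
--             continue
--         ds = [int(c) for c in bank]
--         m = ds[-1]
--         best = 0
--         for d in reversed(ds[:-1]):
--             best = max(best, 10 * d + m)
--             m = max(m, d)
--         total += best
--     return total
-- ===== Notes on version B (the rewrite author's own statement) =====
-- stated objective: alternative
-- what changed: Replaces A's two-scan-per-bank strategy (leftmost argmax of the tens digit over bank[:-1], then a second rescan of the tail for the units digit) by a single right-to-left pass per bank that keeps a running suffix maximum and the best 10*d+suffix_max pair seen so far.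
import Mathlib
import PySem

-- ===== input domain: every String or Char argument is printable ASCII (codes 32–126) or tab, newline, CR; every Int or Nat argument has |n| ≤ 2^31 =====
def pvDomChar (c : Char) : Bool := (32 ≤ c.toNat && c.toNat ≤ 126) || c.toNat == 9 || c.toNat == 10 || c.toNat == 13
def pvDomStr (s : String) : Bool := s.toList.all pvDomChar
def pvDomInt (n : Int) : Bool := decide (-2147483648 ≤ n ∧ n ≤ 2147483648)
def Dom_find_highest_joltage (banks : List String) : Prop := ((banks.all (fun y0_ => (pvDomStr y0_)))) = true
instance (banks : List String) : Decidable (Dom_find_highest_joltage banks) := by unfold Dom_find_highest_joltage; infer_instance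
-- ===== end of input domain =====

-- B replaces A's two scans per bank (leftmost argmax for the tens digit, then a rescan of the
-- tail for the units digit) by ONE right-to-left pass keeping a running suffix maximum
-- (objective: alternative decomposition, same asymptotic cost).

-- int(digit) for a single character; `.getD 0` is unreachable under Pre_ (Python raises ValueError there)
def pyIntChar (c : Char) : Int := (PySem.Int.ofChars? [c]).getD 0

-- ===== PORT A =====
def find_highest_joltage (banks : List String) : Int :=
  banks.foldl (fun total bank =>
    -- for idx, digit in enumerate(bank[:-1]): if int(digit) > highest_ten: …
    let p1 := (PySem.List.enumerate (PySem.Str.slice bank none (some (-1))).toList 0).foldl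
      (fun (st : Int × Int) p => if pyIntChar p.2 > st.1 then (pyIntChar p.2, p.1) else st) (0, 0)
    -- for digit in bank[highest_ten_idx+1:]: if int(digit) > highest_unit: …
    let hu := ((PySem.Str.slice bank (some (p1.2 + 1)) none).toList).foldl
      (fun hu c => if pyIntChar c > hu then pyIntChar c else hu) 0
    total + (10 * p1.1 + hu)) 0

-- ===== PORT B =====
def find_highest_joltage_alt (banks : List String) : Int :=
  banks.foldl (fun total bank =>
    if PySem.Str.len bank < 2 then total
    else
      let ds := bank.toList.map pyIntChar
      -- m = ds[-1]; best = 0; for d in reversed(ds[:-1]): best = max(best, 10*d+m); m = max(m, d)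
      let r := ((PySem.List.slice ds none (some (-1))).reverse).foldl
        (fun (st : Int × Int) d => (max st.1 d, max st.2 (10 * d + st.1)))
        (PySem.List.pyGetD ds (-1) 0, 0)
      total + r.2) 0

-- ===== PRECONDITION & SPEC =====
-- Pre_ excludes exactly the inputs on which Python A raises ValueError: a bank of length ≥ 2
-- containing a non-digit character (int(digit) fails there; banks of length ≤ 1 never reach int()).
def Pre_find_highest_joltage (banks : List String) : Prop :=
  (banks.all (fun b => b.toList.length < 2 || b.toList.all Char.isDigit)) = true
instance (banks : List String) : Decidable (Pre_find_highest_joltage banks) := by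
  unfold Pre_find_highest_joltage; infer_instance

def pvWitness_find_highest_joltage : List String := ["98", "x", ""]

def Spec_find_highest_joltage (banks : List String) (out : Int) : Prop := out = find_highest_joltage_alt banks
instance (banks : List String) (out : Int) : Decidable (Spec_find_highest_joltage banks out) := by unfold Spec_find_highest_joltage; infer_instance

-- ===== CLAIM (what is proved, stated in full; the proofs are below) =====
def Claim_equal_find_highest_joltage : Prop := ∀ (banks : List String), Dom_find_highest_joltage banks → Pre_find_highest_joltage banks → Spec_find_highest_joltage banks (find_highest_joltage banks)

-- ===== LEMMAS AND PROOFS =====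

-- value of int() on a digit character
theorem pv_ofChars_digit (c : Char) (h : c.isDigit) :
    PySem.Int.ofChars? [c] = some ((c.toNat : Int) - 48) := by
  have hb : 48 ≤ c.toNat ∧ c.toNat ≤ 57 := by
    simp only [Char.isDigit, decide_eq_true_eq, Bool.and_eq_true] at h
    exact ⟨Nat.succ_le_of_lt h.1, Fin.mk_le_mk.mp h.2⟩
  obtain ⟨a, b⟩ := hb
  have h2 : c = Char.ofNat c.toNat := (Char.ofNat_toNat c).symm
  interval_cases h3 : c.toNat <;> subst h2 <;> decide

theorem pyIntChar_bounds (c : Char) (h : c.isDigit) : 0 ≤ pyIntChar c ∧ pyIntChar c ≤ 9 := by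
  have hb : 48 ≤ c.toNat ∧ c.toNat ≤ 57 := by
    simp only [Char.isDigit, decide_eq_true_eq, Bool.and_eq_true] at h
    exact ⟨Nat.succ_le_of_lt h.1, Fin.mk_le_mk.mp h.2⟩
  simp only [pyIntChar, pv_ofChars_digit c h, Option.getD_some]
  omega

-- 0-seeded running maximum (what both of A's inner loops compute)
def maxL (l : List Int) : Int := l.foldl max 0

theorem maxL_cons (d : Int) (l : List Int) : maxL (d :: l) = max d (maxL l) := by
  simp only [maxL, List.foldl_cons]
  rw [max_comm 0 d, List.foldl_assoc]

theorem maxL_nonneg (l : List Int) : 0 ≤ maxL l := (PySem.List.le_foldl_max l 0).1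

theorem le_maxL_of_mem {x : Int} {l : List Int} (h : x ∈ l) : x ≤ maxL l :=
  (PySem.List.le_foldl_max l 0).2 x h

theorem maxL_le_nine {l : List Int} (h : ∀ x ∈ l, x ≤ 9) : maxL l ≤ 9 := by
  induction l with
  | nil => simp [maxL]
  | cons d t ih =>
    rw [maxL_cons]
    exact max_le (h d (by simp)) (ih fun x hx => h x (by simp [hx]))

theorem maxL_drop_le (l : List Int) (k : Nat) : maxL (l.drop k) ≤ maxL l := by
  induction l generalizing k with
  | nil => simp
  | cons d t ih =>
    cases k with
    | zero => simp
    | succ k =>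
      simp only [List.drop_succ_cons]
      exact le_trans (ih k) (by rw [maxL_cons]; exact le_max_right _ _)

-- A's first inner loop, on the mapped digit values
def step1 (st : Int × Int) (p : Int × Int) : Int × Int :=
  if p.2 > st.1 then (p.2, p.1) else st

def fidx (l : List Int) (m : Int) : Nat := l.findIdx (· = m)

-- characterisation of A's argmax loop: final max, and the index of the FIRST occurrence of it
theorem phase1_go (l : List Int) (k : Int) (s : Int × Int) (h0 : 0 ≤ s.1) :
    List.foldl step1 s (PySem.List.enumerate l k) =
      if s.1 < maxL l then (maxL l, k + (fidx l (maxL l) : Int)) else s := by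
  induction l generalizing k s with
  | nil =>
    have : ¬ s.1 < maxL ([] : List Int) := by simp [maxL]; omega
    simp [PySem.List.enumerate, this]
  | cons d t ih =>
    rw [PySem.List.enumerate_cons, List.foldl_cons]
    rw [maxL_cons]
    by_cases hd : s.1 < d
    · have hstep : step1 s (k, d) = (d, k) := by simp [step1, hd]
      rw [hstep, ih (k + 1) (d, k) (by simp; omega)]
      have hcond : s.1 < max d (maxL t) := lt_of_lt_of_le hd (le_max_left _ _)
      by_cases hdt : d < maxL t
      · have hmax : max d (maxL t) = maxL t := max_eq_right hdt.le
        have hne : ¬ (d = maxL t) := by omega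
        have hfi : fidx (d :: t) (maxL t) = fidx t (maxL t) + 1 := by
          simp [fidx, List.findIdx_cons, hne]
        rw [if_pos hdt, if_pos hcond, hmax, hfi]
        refine Prod.ext rfl ?_
        push_cast; ring
      · have hmax : max d (maxL t) = d := max_eq_left (by omega)
        have hfi : fidx (d :: t) d = 0 := by simp [fidx, List.findIdx_cons]
        rw [if_neg hdt, if_pos hcond, hmax, hfi]
        refine Prod.ext rfl ?_
        simp
    · have hstep : step1 s (k, d) = s := by simp [step1]; omega
      rw [hstep, ih (k + 1) s h0]
      have hds : d ≤ s.1 := by omega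
      by_cases hst : s.1 < maxL t
      · have hcond : s.1 < max d (maxL t) := lt_of_lt_of_le hst (le_max_right _ _)
        have hmax : max d (maxL t) = maxL t := max_eq_right (by omega)
        have hne : ¬ (d = maxL t) := by omega
        have hfi : fidx (d :: t) (maxL t) = fidx t (maxL t) + 1 := by
          simp [fidx, List.findIdx_cons, hne]
        rw [if_pos hst, if_pos hcond, hmax, hfi]
        refine Prod.ext rfl ?_
        push_cast; ring
      · have hcond : ¬ s.1 < max d (maxL t) := by
          simp only [lt_max_iff, not_or]; omega
        simp [hst, hcond]

-- A's loop body over characters equals step1 over the mapped values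
theorem phase1_map (cs : List Char) (k : Int) (s : Int × Int) :
    List.foldl (fun (st : Int × Int) p => if pyIntChar p.2 > st.1 then (pyIntChar p.2, p.1) else st)
      s (PySem.List.enumerate cs k)
      = List.foldl step1 s (PySem.List.enumerate (cs.map pyIntChar) k) := by
  induction cs generalizing k s with
  | nil => simp [PySem.List.enumerate]
  | cons c t ih =>
    rw [List.map_cons, PySem.List.enumerate_cons, PySem.List.enumerate_cons,
      List.foldl_cons, List.foldl_cons]
    rw [ih]
    rfl

-- A's second inner loop is a 0-seeded running maximum over the mapped values
theorem phase2_eq (cs : List Char) (a : Int) :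
    List.foldl (fun hu c => if pyIntChar c > hu then pyIntChar c else hu) a cs
      = List.foldl max a (cs.map pyIntChar) := by
  induction cs generalizing a with
  | nil => rfl
  | cons c t ih =>
    rw [List.foldl_cons, List.map_cons, List.foldl_cons, ih]
    congr 1
    rcases le_or_gt (pyIntChar c) a with h | h
    · simp [max_eq_left h]; omega
    · simp [max_eq_right h.le, h]

-- first index of the maximum is 0 when the maximum is 0 and all entries are nonnegative
theorem fidx_zero {l : List Int} (hm : maxL l = 0) (hn : ∀ x ∈ l, 0 ≤ x) :
    fidx l 0 = 0 := by
  cases l with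
  | nil => rfl
  | cons d t =>
    have h1 : d ≤ 0 := hm ▸ le_maxL_of_mem (by simp)
    have h2 : d = 0 := le_antisymm h1 (hn d (by simp))
    simp [fidx, List.findIdx_cons, h2]

-- A's per-bank value in closed form
def Fa (ds : List Int) : Int :=
  10 * maxL ds.dropLast + maxL (ds.drop (fidx ds.dropLast (maxL ds.dropLast) + 1))

-- B's reverse fold
def step2 (st : Int × Int) (d : Int) : Int × Int := (max st.1 d, max st.2 (10 * d + st.1))

def brec : List Int → Int → Int → Int
  | [], _, b => b
  | d :: t, m, b => max (brec t m b) (10 * d + t.foldr max m)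

theorem bfold (l : List Int) (m b : Int) :
    List.foldl step2 (m, b) l.reverse = (l.foldr max m, brec l m b) := by
  induction l generalizing b with
  | nil => rfl
  | cons d t ih =>
    rw [List.reverse_cons, List.foldl_append, ih b, List.foldl_cons, List.foldl_nil]
    simp only [step2, brec, List.foldr_cons]
    rw [max_comm d (t.foldr max m)]

theorem foldr_max_eq (t : List Int) (ht : t ≠ []) (hn : ∀ x ∈ t, 0 ≤ x) :
    t.dropLast.foldr max (t.getLast ht) = maxL t := by
  induction t with
  | nil => exact absurd rfl ht
  | cons x t' ih =>
    cases t' with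
    | nil =>
      have h0 := hn x (by simp)
      simp [maxL, max_eq_right h0]
    | cons y t'' =>
      rw [List.dropLast_cons₂, List.getLast_cons (by simp), List.foldr_cons]
      rw [ih (by simp) (fun z hz => hn z (by simp [hz])), maxL_cons, maxL_cons, maxL_cons]

-- the key per-bank identity: A's closed form equals B's reverse-fold recursion
theorem per_bank (ds : List Int) (h : ds ≠ []) (hd : ∀ x ∈ ds, 0 ≤ x ∧ x ≤ 9) :
    Fa ds = brec ds.dropLast (ds.getLast h) 0 := by
  induction ds with
  | nil => exact absurd rfl h
  | cons d t ih =>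
    cases t with
    | nil => simp [Fa, brec, maxL, fidx]
    | cons y t'' =>
      set t : List Int := y :: t'' with ht
      have htne : t ≠ [] := by simp [ht]
      have hdl : (d :: t).dropLast = d :: t.dropLast := by
        rw [ht]; exact List.dropLast_cons₂ ..
      have hgl : (d :: t).getLast h = t.getLast htne := List.getLast_cons htne
      have hnn : ∀ x ∈ t, 0 ≤ x := fun x hx => (hd x (by simp [hx])).1
      have hrhs : brec ((d :: t).dropLast) ((d :: t).getLast h) 0
          = max (brec t.dropLast (t.getLast htne) 0) (10 * d + maxL t) := by
        rw [hdl, hgl]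
        simp only [brec]
        rw [foldr_max_eq t htne hnn]
      have hIH : brec t.dropLast (t.getLast htne) 0 = Fa t :=
        (ih htne (fun x hx => hd x (by simp [hx]))).symm
      rw [hrhs, hIH]
      set Mt := maxL t.dropLast with hMt
      set j := fidx t.dropLast Mt with hj
      have hFa_t : Fa t = 10 * Mt + maxL (t.drop (j + 1)) := rfl
      rcases le_or_gt Mt d with hle | hlt
      · -- tens digit sits at the front: A picks index 0
        have hmax : maxL ((d :: t).dropLast) = d := by
          rw [hdl, maxL_cons, ← hMt]; exact max_eq_left hle
        have hfi : fidx ((d :: t).dropLast) d = 0 := by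
          rw [hdl]; simp [fidx, List.findIdx_cons]
        have hLHS : Fa (d :: t) = 10 * d + maxL t := by
          simp only [Fa, hmax, hfi]
          rfl
        rw [hLHS, hFa_t]
        have h1 : maxL (t.drop (j + 1)) ≤ maxL t := maxL_drop_le t (j + 1)
        exact (max_eq_right (by omega)).symm
      · -- maximum is strictly inside the tail: A's index shifts by one, front pair cannot win
        have hmax : maxL ((d :: t).dropLast) = Mt := by
          rw [hdl, maxL_cons, ← hMt]; exact max_eq_right hlt.le
        have hfi : fidx ((d :: t).dropLast) Mt = j + 1 := by
          have hne : ¬ (d = Mt) := by omega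
          rw [hdl, hj]; simp [fidx, List.findIdx_cons, hne]
        have hLHS : Fa (d :: t) = 10 * Mt + maxL (t.drop (j + 1)) := by
          simp only [Fa, hmax, hfi]
          rfl
        rw [hLHS, hFa_t]
        have h9 : maxL t ≤ 9 := maxL_le_nine (fun x hx => (hd x (by simp [hx])).2)
        have h0 : 0 ≤ maxL (t.drop (j + 1)) := maxL_nonneg _
        exact (max_eq_left (by omega)).symm

-- A's per-bank computation equals the closed form Fa, on digit banks
theorem bankA_eq_Fa (bank : String) (hdig : ∀ c ∈ bank.toList, c.isDigit) :
    (let p1 := (PySem.List.enumerate (PySem.Str.slice bank none (some (-1))).toList 0).foldl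
      (fun (st : Int × Int) p => if pyIntChar p.2 > st.1 then (pyIntChar p.2, p.1) else st) (0, 0)
     let hu := ((PySem.Str.slice bank (some (p1.2 + 1)) none).toList).foldl
      (fun hu c => if pyIntChar c > hu then pyIntChar c else hu) 0
     10 * p1.1 + hu) = Fa (bank.toList.map pyIntChar) := by
  set cs := bank.toList with hcs
  set ds := cs.map pyIntChar with hds
  have hnn : ∀ x ∈ ds, 0 ≤ x := by
    intro x hx
    rw [hds, List.mem_map] at hx
    obtain ⟨c, hc, rfl⟩ := hx
    exact (pyIntChar_bounds c (hdig c hc)).1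
  have hslice1 : (PySem.Str.slice bank none (some (-1))).toList = cs.dropLast :=
    PySem.Str.slice_to_neg_one bank
  have hdldL : cs.dropLast.map pyIntChar = ds.dropLast := List.map_dropLast
  rw [hslice1, phase1_map, hdldL,
    phase1_go ds.dropLast 0 (0, 0) le_rfl]
  set M := maxL ds.dropLast with hM
  have hM0 : 0 ≤ M := maxL_nonneg _
  by_cases hpos : (0 : Int) < M
  · simp only [if_pos hpos]
    have hsl : (PySem.Str.slice bank (some ((0 + (fidx ds.dropLast M : Int)) + 1)) none).toList
        = cs.drop (fidx ds.dropLast M + 1) := by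
      rw [PySem.Str.toList_slice, PySem.Chars.slice_eq_listSlice,
        PySem.List.slice_from _ (by positivity)]
      congr 1
      omega
    rw [hsl, phase2_eq, List.map_drop, ← hds, hM]
    rfl
  · have hMz : M = 0 := by omega
    simp only [if_neg hpos]
    have hfz : fidx ds.dropLast M = 0 := by
      have hm0 : maxL ds.dropLast = 0 := by rw [← hM]; exact hMz
      rw [hMz]
      exact fidx_zero hm0 (fun x hx => hnn x (List.mem_of_mem_dropLast hx))
    have hsl : (PySem.Str.slice bank (some ((0 : Int) + 1)) none).toList = cs.drop 1 := by
      rw [PySem.Str.toList_slice, PySem.Chars.slice_eq_listSlice,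
        PySem.List.slice_from _ (by norm_num)]
      norm_num
      rw [hcs]
    rw [hsl, phase2_eq, List.map_drop, ← hds]
    rw [show Fa ds = 10 * maxL ds.dropLast
        + maxL (List.drop (fidx ds.dropLast (maxL ds.dropLast) + 1) ds) from rfl,
      ← hM, hfz, hMz]
    norm_num [maxL]

-- B's per-bank computation equals brec
theorem bankB_eq_brec (bank : String) (h2 : 2 ≤ bank.toList.length) :
    (((PySem.List.slice (bank.toList.map pyIntChar) none (some (-1))).reverse).foldl
        (fun (st : Int × Int) d => (max st.1 d, max st.2 (10 * d + st.1)))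
        (PySem.List.pyGetD (bank.toList.map pyIntChar) (-1) 0, 0)).2
      = brec (bank.toList.map pyIntChar).dropLast
          ((bank.toList.map pyIntChar).getLast (by
            apply List.ne_nil_of_length_pos
            rw [List.length_map]
            omega)) 0 := by
  set ds := bank.toList.map pyIntChar with hds
  have hne : ds ≠ [] := by
    apply List.ne_nil_of_length_pos
    rw [hds, List.length_map]
    omega
  rw [PySem.List.slice_to_neg_one, PySem.List.pyGetD_neg_one ds 0 hne]
  have : (fun (st : Int × Int) d => (max st.1 d, max st.2 (10 * d + st.1))) = step2 := rfl
  rw [this, bfold]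

-- per-bank contributions agree (the short-bank case gives 0 on both sides)
theorem bank_contrib (bank : String)
    (hpre : 2 ≤ bank.toList.length → ∀ c ∈ bank.toList, c.isDigit) (total : Int) :
    (let p1 := (PySem.List.enumerate (PySem.Str.slice bank none (some (-1))).toList 0).foldl
      (fun (st : Int × Int) p => if pyIntChar p.2 > st.1 then (pyIntChar p.2, p.1) else st) (0, 0)
     let hu := ((PySem.Str.slice bank (some (p1.2 + 1)) none).toList).foldl
      (fun hu c => if pyIntChar c > hu then pyIntChar c else hu) 0
     total + (10 * p1.1 + hu)) =
    (if PySem.Str.len bank < 2 then total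
     else
      let ds := bank.toList.map pyIntChar
      let r := ((PySem.List.slice ds none (some (-1))).reverse).foldl
        (fun (st : Int × Int) d => (max st.1 d, max st.2 (10 * d + st.1)))
        (PySem.List.pyGetD ds (-1) 0, 0)
      total + r.2) := by
  by_cases hlen : bank.toList.length < 2
  · -- bank shorter than 2: A contributes 0, B skips the bank
    have hb : PySem.Str.len bank < 2 := by have := PySem.Str.len_eq bank; omega
    rw [if_pos hb]
    have hslice1 : (PySem.Str.slice bank none (some (-1))).toList = bank.toList.dropLast :=
      PySem.Str.slice_to_neg_one bank
    interval_cases hl : bank.toList.length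
    · have he : bank.toList = [] := List.length_eq_zero_iff.mp hl
      simp [hslice1, he, PySem.Str.toList_slice,
        PySem.Chars.slice_eq_listSlice]
      rfl
    · obtain ⟨c, hc⟩ := List.length_eq_one_iff.mp hl
      simp [hslice1, hc, PySem.Str.toList_slice,
        PySem.Chars.slice_eq_listSlice]
      rfl
  · have h2 : 2 ≤ bank.toList.length := by omega
    have hb : ¬ PySem.Str.len bank < 2 := by have := PySem.Str.len_eq bank; omega
    rw [if_neg hb]
    have hdig := hpre h2
    have hA := bankA_eq_Fa bank hdig
    simp only at hA ⊢
    rw [hA, congrArg (total + ·) (per_bank (bank.toList.map pyIntChar)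
      (by apply List.ne_nil_of_length_pos; rw [List.length_map]; omega)
      (by intro x hx
          rw [List.mem_map] at hx
          obtain ⟨c, hc, rfl⟩ := hx
          exact pyIntChar_bounds c (hdig c hc)))]
    rw [bankB_eq_brec bank h2]

-- fold the per-bank equality over the list of banks
theorem banks_fold (banks : List String)
    (hpre : ∀ b ∈ banks, 2 ≤ b.toList.length → ∀ c ∈ b.toList, c.isDigit) (total : Int) :
    banks.foldl (fun total bank =>
      let p1 := (PySem.List.enumerate (PySem.Str.slice bank none (some (-1))).toList 0).foldl
        (fun (st : Int × Int) p => if pyIntChar p.2 > st.1 then (pyIntChar p.2, p.1) else st) (0, 0)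
      let hu := ((PySem.Str.slice bank (some (p1.2 + 1)) none).toList).foldl
        (fun hu c => if pyIntChar c > hu then pyIntChar c else hu) 0
      total + (10 * p1.1 + hu)) total =
    banks.foldl (fun total bank =>
      if PySem.Str.len bank < 2 then total
      else
        let ds := bank.toList.map pyIntChar
        let r := ((PySem.List.slice ds none (some (-1))).reverse).foldl
          (fun (st : Int × Int) d => (max st.1 d, max st.2 (10 * d + st.1)))
          (PySem.List.pyGetD ds (-1) 0, 0)
        total + r.2) total := by
  induction banks generalizing total with
  | nil => rfl
  | cons b bs ih =>
    rw [List.foldl_cons, List.foldl_cons]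
    rw [← bank_contrib b (hpre b (by simp)) total]
    exact ih (fun x hx h2 => hpre x (by simp [hx]) h2) _

-- ===== VERDICT (by name: the statement is the Claim_ definition above) =====
theorem find_highest_joltage_spec : Claim_equal_find_highest_joltage := by
  intro banks _ hpre
  have hpre' : ∀ b ∈ banks, 2 ≤ b.toList.length → ∀ c ∈ b.toList, c.isDigit := by
    intro b hb h2 c hc
    unfold Pre_find_highest_joltage at hpre
    rw [List.all_eq_true] at hpre
    have := hpre b hb
    simp only [Bool.or_eq_true, decide_eq_true_eq, List.all_eq_true] at this
    rcases this with h' | h'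
    · omega
    · exact h' c hc
  unfold Spec_find_highest_joltage find_highest_joltage find_highest_joltage_alt
  exact banks_fold banks hpre' 0
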